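/- GENERATED by tools/from_farm_form.py from prooffarm-gif/accepted/gif_decode.4/Proof.lean (a worked proof of the farm's unit `gif_decode.4`,
   accepted by the verdict) — do not edit. -/
import Gif.Spec.Units.gif_decode_4
import Gif.Spec.AllSegs
import Gif.Spec.Proved.gif_decode_4_Lemmas

open X86 X86.User Asan ProgX.Base ProgX.Base.Spec Gif.Spec

/-!
  `gif_decode.4` (0x10af77 … 0x10af93, 7 instructions; gif_driver.c:220): `report->digest = digest_file(gif, &report->pixels)`.
  A body segment of the driver's protected function behind DGifOpen: digest_file under the `Env` made of `Open.inv`, the entry's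
  `HeapPre`, `gif_decode.ctx` and `Open.ok`; then one checked 8-byte store into the report. The heap and the forest do not change.
  The call's return address 0x10af83 (`ret26`) is a private cut (`Held` at `ret26`); two walks (Lemmas.lean), chained here.
-/

/-- Segment 4 of `gif_decode` takes `Held` at 0x10af77 to `Held` at 0x10af93. -/
theorem Gif.Spec.Proved.gif_decode_4_ok : Gif.Spec.gif_decode_4.Statement := by
  intro Lay hLay μ hμ u₀ hcode h_digest_file h_asan_store8_noabort H rest frames Hc Fc e ret v hat
  -- digest_file's contract for the present heap and forest, the frame list of the body and THE READER OF THIS FRAME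
  have hdig := h_digest_file Hc rest (gif_decode.framesIn frames e) Fc (gif_decode.reader e)
  -- 0x10af77 … the call … 0x10af83
  refine (Gif.Spec.gif_decode_4.gd4_seg_call Lay hLay μ hμ u₀ hcode H rest frames Hc Fc e ret hdig v hat).trans ?_
  -- 0x10af83 … the checked store … 0x10af93
  intro v1 hv1
  exact Gif.Spec.gif_decode_4.gd4_seg_tail Lay hLay μ hμ u₀ hcode H rest frames Hc Fc e ret h_asan_store8_noabort v1 hv1
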